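-- pv_equiv track=rewrite | github.com/InfostatusAu/ai-olympics-charmander | src/prospect_research/profile.py | _get_primary_contact_title
-- ===== SOURCE A (Python) =====
-- from typing import Dict, Any, Union
--
-- def _get_primary_contact_title(parsed_data: Dict[str, Any]) -> str:
--     """Get primary contact title."""
--     decision_makers = parsed_data.get("decision_makers", [])
--     if decision_makers:
--         for dm in decision_makers:
--             if 'ceo' in dm.get("title", "").lower():
--                 return dm.get("title", "N/A")
--         for dm in decision_makers:
--             if any(title in dm.get("title", "").lower() for title in ['cto', 'coo', 'vp']):
--                 return dm.get("title", "N/A")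
--         return decision_makers[0].get("title", "N/A")
--     return "Leadership Role"
-- ===== SOURCE B (Python) =====
-- def _get_primary_contact_title(parsed_data):
--     """Get primary contact title: single priority-keyed pass instead of two scans."""
--     decision_makers = parsed_data.get("decision_makers", [])
--     if not decision_makers:
--         return "Leadership Role"
--     best_p, best_dm = 3, None
--     for dm in decision_makers:
--         t = dm.get("title", "").lower()
--         p = 0 if 'ceo' in t else (1 if any(k in t for k in ('cto', 'coo', 'vp')) else 2)
--         if p < best_p:
--             best_p, best_dm = p, dm
--             if p == 0:
--                 break
--     return best_dm.get("title", "N/A")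
-- ===== Notes on version B (the rewrite author's own statement) =====
-- stated objective: alternative
-- what changed: Replaced A's two sequential keyword scans (first for 'ceo', then for 'cto'/'coo'/'vp') with a single pass that assigns each decision maker a priority (0 ceo, 1 cto/coo/vp, 2 other) and keeps the first minimal-priority one, breaking early on priority 0.
import Mathlib
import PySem

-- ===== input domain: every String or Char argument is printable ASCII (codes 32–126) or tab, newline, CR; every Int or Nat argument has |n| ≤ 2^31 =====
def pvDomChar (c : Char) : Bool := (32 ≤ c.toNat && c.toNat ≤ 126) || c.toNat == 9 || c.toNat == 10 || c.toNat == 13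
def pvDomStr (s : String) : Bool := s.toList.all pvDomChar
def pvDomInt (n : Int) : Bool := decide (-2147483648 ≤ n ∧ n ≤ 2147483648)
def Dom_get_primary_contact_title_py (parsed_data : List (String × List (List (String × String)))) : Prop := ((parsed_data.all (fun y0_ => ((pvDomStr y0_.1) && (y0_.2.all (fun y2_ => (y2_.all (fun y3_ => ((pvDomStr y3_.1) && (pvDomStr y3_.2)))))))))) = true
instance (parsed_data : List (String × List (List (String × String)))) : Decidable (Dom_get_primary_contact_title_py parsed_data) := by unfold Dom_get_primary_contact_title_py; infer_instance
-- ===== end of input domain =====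

-- B replaces A's two sequential keyword scans with a single priority-keyed selection pass (alternative decomposition, same cost).


-- ===== PORT A =====
-- dict.get(key, default) on an association list: first match, else the default (exact for Python dicts of distinct keys; shared by both ports)
def pvAssocGetD {α : Type} (d : List (String × α)) (k : String) (dflt : α) : α :=
  match d.find? (fun p => p.1 == k) with
  | some p => p.2
  | none => dflt

def get_primary_contact_title_py (parsed_data : List (String × List (List (String × String)))) : String :=
  let decision_makers := pvAssocGetD parsed_data "decision_makers" []
  match decision_makers with
  | [] => "Leadership Role"
  | first :: _ =>
    -- first scan: any 'ceo' title (for-loop with early return = find?)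
    match decision_makers.find? (fun dm => PySem.Str.isIn "ceo" (PySem.Str.lower (pvAssocGetD dm "title" ""))) with
    | some dm => pvAssocGetD dm "title" "N/A"
    | none =>
      -- second scan: any 'cto'/'coo'/'vp' title
      match decision_makers.find? (fun dm => ["cto", "coo", "vp"].any (fun t => PySem.Str.isIn t (PySem.Str.lower (pvAssocGetD dm "title" "")))) with
      | some dm => pvAssocGetD dm "title" "N/A"
      | none => pvAssocGetD first "title" "N/A"

-- ===== PORT B =====
-- priority of a lowered title: 0 = 'ceo', 1 = 'cto'/'coo'/'vp', 2 = anything else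
def pvPrio (t : String) : Nat :=
  if PySem.Str.isIn "ceo" t then 0
  else if ["cto", "coo", "vp"].any (fun k => PySem.Str.isIn k t) then 1 else 2

-- the single selection pass of Source B: track (best_p, best_dm), break early on priority 0
def pvBestLoop : List (List (String × String)) → Nat → List (String × String) → List (String × String)
  | [], _, best => best
  | dm :: rest, bestp, best =>
    let p := pvPrio (PySem.Str.lower (pvAssocGetD dm "title" ""))
    if p < bestp then
      if p = 0 then dm else pvBestLoop rest p dm
    else pvBestLoop rest bestp best

def get_primary_contact_title_py_alt (parsed_data : List (String × List (List (String × String)))) : String :=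
  let decision_makers := pvAssocGetD parsed_data "decision_makers" []
  match decision_makers with
  | [] => "Leadership Role"
  | _ :: _ => pvAssocGetD (pvBestLoop decision_makers 3 []) "title" "N/A"

-- ===== PRECONDITION & SPEC =====
def Spec_get_primary_contact_title_py (parsed_data : List (String × List (List (String × String)))) (out : String) : Prop := out = get_primary_contact_title_py_alt parsed_data
instance (parsed_data : List (String × List (List (String × String)))) (out : String) : Decidable (Spec_get_primary_contact_title_py parsed_data out) := by unfold Spec_get_primary_contact_title_py; infer_instance

-- ===== CLAIM (what is proved, stated in full; the proofs are below) =====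
def Claim_equal_get_primary_contact_title_py : Prop := ∀ (parsed_data : List (String × List (List (String × String)))), Dom_get_primary_contact_title_py parsed_data → Spec_get_primary_contact_title_py parsed_data (get_primary_contact_title_py parsed_data)

-- ===== LEMMAS AND PROOFS =====

-- dm's priority (lowered title)
def pvP (dm : List (String × String)) : Nat := pvPrio (PySem.Str.lower (pvAssocGetD dm "title" ""))

lemma pvP_cases (dm : List (String × String)) : pvP dm = 0 ∨ pvP dm = 1 ∨ pvP dm = 2 := by
  unfold pvP pvPrio; split_ifs <;> simp

lemma pvCeo_eq (dm : List (String × String)) :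
    PySem.Str.isIn "ceo" (PySem.Str.lower (pvAssocGetD dm "title" "")) = (pvP dm == 0) := by
  unfold pvP pvPrio; split_ifs with h <;> simp_all

lemma pvKw_eq (dm : List (String × String)) (h : pvP dm ≠ 0) :
    (["cto", "coo", "vp"].any
      (fun t => PySem.Str.isIn t (PySem.Str.lower (pvAssocGetD dm "title" "")))) = (pvP dm == 1) := by
  unfold pvP pvPrio at *; split_ifs at * with h1 h2 <;> simp_all

lemma pvFind?_congr_mem {α : Type} (p q : α → Bool) (l : List α)
    (h : ∀ x ∈ l, p x = q x) : l.find? p = l.find? q := by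
  induction l with
  | nil => rfl
  | cons a t ih =>
    simp only [List.find?_cons, h a (List.mem_cons_self)]
    cases q a
    · exact ih (fun x hx => h x (List.mem_cons_of_mem a hx))
    · rfl

lemma pvBestLoop_keep (dms : List (List (String × String))) (bestp : Nat)
    (best : List (String × String)) (h : ∀ d ∈ dms, ¬ pvP d < bestp) :
    pvBestLoop dms bestp best = best := by
  induction dms generalizing bestp best with
  | nil => rfl
  | cons dm rest ih =>
    have h1 := h dm (List.mem_cons_self)
    simp only [pvBestLoop]
    rw [show pvPrio (PySem.Str.lower (pvAssocGetD dm "title" "")) = pvP dm from rfl, if_neg h1]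
    exact ih bestp best (fun d hd => h d (List.mem_cons_of_mem dm hd))

lemma pvBestLoop_zero (dms : List (List (String × String))) (bestp : Nat)
    (best d : List (String × String)) (hb : 0 < bestp)
    (h : dms.find? (fun dm => pvP dm == 0) = some d) :
    pvBestLoop dms bestp best = d := by
  induction dms generalizing bestp best with
  | nil => simp at h
  | cons dm rest ih =>
    simp only [pvBestLoop]
    rw [show pvPrio (PySem.Str.lower (pvAssocGetD dm "title" "")) = pvP dm from rfl]
    by_cases hdm : pvP dm = 0
    · rw [List.find?_cons_of_pos (by simp [hdm])] at h
      injection h with h; subst h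
      rw [hdm, if_pos hb, if_pos rfl]
    · rw [List.find?_cons_of_neg (by simp [hdm])] at h
      by_cases hlt : pvP dm < bestp
      · rw [if_pos hlt, if_neg hdm]
        exact ih _ _ (Nat.pos_of_ne_zero hdm) h
      · rw [if_neg hlt]
        exact ih _ _ hb h

lemma pvBestLoop_one (dms : List (List (String × String))) (bestp : Nat)
    (best d : List (String × String)) (hb : 2 ≤ bestp)
    (h0 : dms.find? (fun dm => pvP dm == 0) = none)
    (h1 : dms.find? (fun dm => pvP dm == 1) = some d) :
    pvBestLoop dms bestp best = d := by
  induction dms generalizing bestp best with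
  | nil => simp at h1
  | cons dm rest ih =>
    have hdm0 : pvP dm ≠ 0 := by
      intro hx
      rw [List.find?_cons_of_pos (by simp [hx])] at h0
      simp at h0
    rw [List.find?_cons_of_neg (by simp [hdm0])] at h0
    simp only [pvBestLoop]
    rw [show pvPrio (PySem.Str.lower (pvAssocGetD dm "title" "")) = pvP dm from rfl]
    by_cases hdm1 : pvP dm = 1
    · rw [List.find?_cons_of_pos (by simp [hdm1])] at h1
      injection h1 with h1; subst h1
      rw [hdm1, if_pos (by omega), if_neg (by omega)]
      apply pvBestLoop_keep
      intro e he
      have : pvP e ≠ 0 := by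
        intro hx
        rw [List.find?_eq_none] at h0
        exact (h0 e he) (by simp [hx])
      omega
    · rw [List.find?_cons_of_neg (by simp [hdm1])] at h1
      have hdm2 : pvP dm = 2 := by rcases pvP_cases dm with h | h | h <;> simp_all
      rw [hdm2]
      by_cases hlt : (2 : Nat) < bestp
      · rw [if_pos hlt, if_neg (by omega)]
        exact ih _ _ (by omega) h0 h1
      · rw [if_neg hlt]
        exact ih _ _ hb h0 h1

lemma pvBestLoop_default (dm : List (String × String)) (rest : List (List (String × String)))
    (best : List (String × String))
    (h0 : (dm :: rest).find? (fun dm => pvP dm == 0) = none)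
    (h1 : (dm :: rest).find? (fun dm => pvP dm == 1) = none) :
    pvBestLoop (dm :: rest) 3 best = dm := by
  rw [List.find?_eq_none] at h0 h1
  have hdm2 : pvP dm = 2 := by
    rcases pvP_cases dm with h | h | h
    · exact absurd (by simp [h]) (h0 dm List.mem_cons_self)
    · exact absurd (by simp [h]) (h1 dm List.mem_cons_self)
    · exact h
  simp only [pvBestLoop]
  rw [show pvPrio (PySem.Str.lower (pvAssocGetD dm "title" "")) = pvP dm from rfl]
  rw [hdm2, if_pos (by omega), if_neg (by omega)]
  apply pvBestLoop_keep
  intro e he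
  have he0 : pvP e ≠ 0 := fun hx => (h0 e (List.mem_cons_of_mem dm he)) (by simp [hx])
  have he1 : pvP e ≠ 1 := fun hx => (h1 e (List.mem_cons_of_mem dm he)) (by simp [hx])
  omega

-- ===== VERDICT (by name: the statement is the Claim_ definition above) =====
theorem get_primary_contact_title_py_spec : Claim_equal_get_primary_contact_title_py := by
  intro pd _
  unfold Spec_get_primary_contact_title_py
  unfold get_primary_contact_title_py get_primary_contact_title_py_alt
  cases hdms : pvAssocGetD pd "decision_makers" ([] : List (List (String × String))) with
  | nil => rfl
  | cons first rest =>
    dsimp only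
    have hceo : (fun dm => PySem.Str.isIn "ceo" (PySem.Str.lower (pvAssocGetD dm "title" "")))
        = (fun dm : List (String × String) => pvP dm == 0) := funext fun dm => pvCeo_eq dm
    rw [hceo]
    cases h0 : (first :: rest).find? (fun dm => pvP dm == 0) with
    | some d => rw [pvBestLoop_zero _ 3 [] d (by omega) h0]
    | none =>
      have hkw : (first :: rest).find?
            (fun dm => ["cto", "coo", "vp"].any
              (fun t => PySem.Str.isIn t (PySem.Str.lower (pvAssocGetD dm "title" ""))))
          = (first :: rest).find? (fun dm : List (String × String) => pvP dm == 1) := by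
        apply pvFind?_congr_mem
        intro dm hmem
        have hdm0 : pvP dm ≠ 0 := by
          intro hx
          rw [List.find?_eq_none] at h0
          exact (h0 dm hmem) (by simp [hx])
        exact pvKw_eq dm hdm0
      rw [hkw]
      cases h1 : (first :: rest).find? (fun dm => pvP dm == 1) with
      | some d => rw [pvBestLoop_one _ 3 [] d (by omega) h0 h1]
      | none => rw [pvBestLoop_default first rest [] h0 h1]
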